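-- pv_equiv track=rewrite | github.com/kylemeador/symdesign | SequenceProfile.py | pdb_to_pose_offset
-- ===== SOURCE A (Python) =====
-- from typing import Sequence, Any, Iterable, get_args, Literal, Iterator, AnyStr
--
-- def pdb_to_pose_offset(reference_sequence: dict[Any, Sequence]) -> dict[Any, int]:
--     """Take a dictionary with chain name as keys and return the length of Pose numbering offset
--
--     Args:
--         reference_sequence: {key1: 'MSGKLDA...', ...} or {key2: {1: 'A', 2: 'S', ...}, ...}
--     Returns:
--         {key1: 0, key2: 123, ...}
--     """
--     offset = {}
--     # prior_chain = None
--     prior_chains_len = prior_key = 0  # prior_key not used as 0 but to ensure initialized nonetheless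
--     for idx, key in enumerate(reference_sequence):
--         if idx > 0:
--             prior_chains_len += len(reference_sequence[prior_key])
--         offset[key] = prior_chains_len
--         # insert function here? Make this a decorator!?
--         prior_key = key
--
--     return offset
-- ===== SOURCE B (Python) =====
-- def pdb_to_pose_offset(reference_sequence):
--     """Back-to-front construction: start from the total length and walk the keys
--     in reverse, subtracting each chain's own length to get its offset (total
--     minus suffix sums), then reverse the pairs into the result dict."""
--     running = sum(len(value) for value in reference_sequence.values())
--     pairs = []
--     for key in reversed(list(reference_sequence)):
--         running -= len(reference_sequence[key])
--         pairs.append((key, running))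
--     return dict(reversed(pairs))
-- ===== Notes on version B (the rewrite author's own statement) =====
-- stated objective: alternative
-- what changed: Instead of A's forward pass that accumulates prior-chain lengths with lagged prior_key/prior_chains_len state, B first computes the grand total of all chain lengths and then walks the keys BACK-TO-FRONT, subtracting each chain's own length from a running total (offset = total minus suffix sum), finally reversing the collected pairs into the dict.
import Mathlib
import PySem

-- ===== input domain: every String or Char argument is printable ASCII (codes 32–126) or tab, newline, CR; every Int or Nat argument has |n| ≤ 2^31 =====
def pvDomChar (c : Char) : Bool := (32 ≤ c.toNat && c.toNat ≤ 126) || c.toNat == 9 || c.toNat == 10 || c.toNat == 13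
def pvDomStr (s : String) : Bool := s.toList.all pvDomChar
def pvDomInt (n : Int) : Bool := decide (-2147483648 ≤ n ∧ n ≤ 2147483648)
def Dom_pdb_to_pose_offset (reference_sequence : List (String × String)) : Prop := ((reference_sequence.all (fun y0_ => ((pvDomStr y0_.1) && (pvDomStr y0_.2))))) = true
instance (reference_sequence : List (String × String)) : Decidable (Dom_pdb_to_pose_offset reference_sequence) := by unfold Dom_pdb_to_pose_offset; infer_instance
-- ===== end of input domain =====

-- B builds the table back-to-front: it totals the chain lengths once, then subtracts each chain's own length while walking keys in reverse (offset = total − suffix sum) — an alternative decomposition, same O(n) cost.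


-- ===== PORT A =====
-- Python A receives a dict; the assoc-list argument becomes that dict (later values overwrite, first position kept).
-- 'reference_sequence[prior_key]' is only evaluated when idx > 0, where prior_key is a key of d; the getD "" default is unreachable.
def pdb_to_pose_offset (reference_sequence : List (String × String)) : List (String × Int) :=
  let d : PySem.Dict String String := PySem.Dict.ofList reference_sequence
  (((PySem.List.enumerate d.keys 0).foldl
      (fun (st : PySem.Dict String Int × Int × String) (p : Int × String) =>
        let prior_chains_len :=
          if p.1 > 0 then st.2.1 + PySem.Str.len ((d.get? st.2.2).getD "") else st.2.1
        (st.1.insert p.2 prior_chains_len, prior_chains_len, p.2))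
      (PySem.Dict.empty, 0, "")).1).items

-- ===== PORT B =====
-- B: total all lengths, walk keys in reverse subtracting each chain's own length,
-- collect (key, running) pairs, reverse them into the result dict.
-- 'reference_sequence[key]' is evaluated only at keys of d; the getD "" default is unreachable.
def pdb_to_pose_offset_alt (reference_sequence : List (String × String)) : List (String × Int) :=
  let d : PySem.Dict String String := PySem.Dict.ofList reference_sequence
  let st := d.keys.reverse.foldl
      (fun (st : List (String × Int) × Int) k =>
        let running := st.2 - PySem.Str.len ((d.get? k).getD "")
        (st.1 ++ [(k, running)], running))
      ([], (d.values.map PySem.Str.len).sum)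
  (PySem.Dict.ofList st.1.reverse).items

-- ===== PRECONDITION & SPEC =====
def Spec_pdb_to_pose_offset (reference_sequence : List (String × String)) (out : List (String × Int)) : Prop := out = pdb_to_pose_offset_alt reference_sequence
instance (reference_sequence : List (String × String)) (out : List (String × Int)) : Decidable (Spec_pdb_to_pose_offset reference_sequence out) := by unfold Spec_pdb_to_pose_offset; infer_instance

-- ===== CLAIM (what is proved, stated in full; the proofs are below) =====
def Claim_equal_pdb_to_pose_offset : Prop := ∀ (reference_sequence : List (String × String)), Dom_pdb_to_pose_offset reference_sequence → Spec_pdb_to_pose_offset reference_sequence (pdb_to_pose_offset reference_sequence)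

-- ===== LEMMAS AND PROOFS =====

-- A's loop over the tail (all indices ≥ 1, so the guard holds): the dict grows by
-- ks zipped with the running sums starting at len + f pk.
theorem pdbA_tail_items (f : String → Int) (ks : List String) :
    ∀ (s : Int), 1 ≤ s → ∀ (acc : PySem.Dict String Int) (len : Int) (pk : String),
    (∀ k ∈ ks, acc.contains k = false) → ks.Nodup →
    (((PySem.List.enumerate ks s).foldl
        (fun (st : PySem.Dict String Int × Int × String) (p : Int × String) =>
          (st.1.insert p.2 (if p.1 > 0 then st.2.1 + f st.2.2 else st.2.1),
            if p.1 > 0 then st.2.1 + f st.2.2 else st.2.1, p.2))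
        (acc, len, pk)).1).items
      = acc.items ++ ks.zip (List.scanl (fun a b => a + b) (len + f pk) (ks.map f)) := by
  induction ks with
  | nil => intro s hs acc len pk _ _; simp [PySem.List.enumerate]
  | cons k ks ih =>
    intro s hs acc len pk hfresh hnd
    rw [PySem.List.enumerate_cons]
    simp only [List.foldl_cons]
    have hk : acc.contains k = false := hfresh k (List.mem_cons_self ..)
    have hgt : s > 0 := by omega
    simp only [hgt, if_pos]
    rw [ih (s + 1) (by omega) (acc.insert k (len + f pk)) (len + f pk) k
        (by
          intro k' hk'
          have hne : k' ≠ k := by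
            intro h; subst h; exact (List.nodup_cons.mp hnd).1 hk'
          rw [PySem.Dict.contains_insert]
          simp [hne, hfresh k' (List.mem_cons_of_mem _ hk')])
        (List.nodup_cons.mp hnd).2]
    rw [PySem.Dict.items_insert_of_not_contains _ _ hk]
    simp [List.scanl_cons]

-- A's whole loop produces exactly ks zipped with exclusive prefix sums, for any distinct key list.
theorem pdbA_items (f : String → Int) (ks : List String) (hnd : ks.Nodup) :
    (((PySem.List.enumerate ks 0).foldl
        (fun (st : PySem.Dict String Int × Int × String) (p : Int × String) =>
          (st.1.insert p.2 (if p.1 > 0 then st.2.1 + f st.2.2 else st.2.1),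
            if p.1 > 0 then st.2.1 + f st.2.2 else st.2.1, p.2))
        (PySem.Dict.empty, 0, "")).1).items
      = (PySem.Dict.ofList (ks.zip (List.scanl (fun a b => a + b) 0 (ks.map f)))).items := by
  have hlen : ks.length ≤ (List.scanl (fun a b : Int => a + b) 0 (ks.map f)).length := by
    simp [List.length_scanl]
  have hB : (PySem.Dict.ofList (ks.zip (List.scanl (fun a b => a + b) 0 (ks.map f)))).items
      = ks.zip (List.scanl (fun a b => a + b) 0 (ks.map f)) := by
    have := PySem.Dict.items_foldl_insert_fresh
        (ks.zip (List.scanl (fun a b => a + b) 0 (ks.map f)))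
        Prod.fst Prod.snd PySem.Dict.empty
        (by intro a _; simp [PySem.Dict.contains_empty])
        (by rw [List.map_fst_zip hlen]; exact hnd)
    simpa [PySem.Dict.ofList, PySem.Dict.update, PySem.Dict.items] using this
  rw [hB]
  cases ks with
  | nil => rfl
  | cons k ks =>
    rw [PySem.List.enumerate_cons]
    simp only [List.foldl_cons]
    have h0 : ¬ ((0 : Int) > 0) := by omega
    simp only [h0, if_false, zero_add]
    rw [pdbA_tail_items f ks 1 (by omega) (PySem.Dict.empty.insert k 0) 0 k
        (by
          intro k' hk'
          have hne : k' ≠ k := by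
            intro h; subst h; exact (List.nodup_cons.mp hnd).1 hk'
          rw [PySem.Dict.contains_insert]
          simp [hne, PySem.Dict.contains_empty])
        (List.nodup_cons.mp hnd).2]
    rw [PySem.Dict.items_insert_of_not_contains _ _ (PySem.Dict.contains_empty k)]
    simp [List.scanl_cons, PySem.Dict.empty]

-- B's reversed fold: subtracting suffix sums from s yields (in reverse) exactly the
-- zip with prefix sums started at s - total(ks), and the running value ends at s - total(ks).
theorem pdbB_fold (f : String → Int) (ks : List String) :
    ∀ (acc : List (String × Int)) (s : Int),
    ks.reverse.foldl
        (fun (st : List (String × Int) × Int) k => (st.1 ++ [(k, st.2 - f k)], st.2 - f k))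
        (acc, s)
      = (acc ++ (ks.zip (List.scanl (fun a b => a + b) (s - (ks.map f).sum) (ks.map f))).reverse,
         s - (ks.map f).sum) := by
  induction ks with
  | nil => intro acc s; simp
  | cons k ks ih =>
    intro acc s
    rw [List.reverse_cons, List.foldl_append]
    rw [ih acc s]
    simp only [List.foldl_cons, List.foldl_nil, List.map_cons, List.sum_cons, List.scanl_cons,
      List.zip_cons_cons, List.reverse_cons]
    have h2 : s - (f k + (ks.map f).sum) + f k = s - (ks.map f).sum := by ring
    have h1 : s - (ks.map f).sum - f k = s - (f k + (ks.map f).sum) := by ring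
    rw [h2, h1, List.append_assoc]

theorem pdb_equal (reference_sequence : List (String × String)) :
    pdb_to_pose_offset reference_sequence = pdb_to_pose_offset_alt reference_sequence := by
  simp only [pdb_to_pose_offset, pdb_to_pose_offset_alt]
  set d := PySem.Dict.ofList reference_sequence with hd
  have hnd : d.keys.Nodup := PySem.Dict.nodup_keys_ofList reference_sequence
  set f : String → Int := fun k => PySem.Str.len ((d.get? k).getD "") with hf
  have htot : (d.values.map PySem.Str.len).sum = (d.keys.map f).sum := by
    rw [PySem.Dict.values_eq_map_keys d hnd ""]
    simp [hf, Function.comp_def, PySem.Str.len, PySem.Dict.getD_eq_get?_getD]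
  rw [pdbB_fold f d.keys [] ((d.values.map PySem.Str.len).sum)]
  rw [htot]
  simp only [sub_self, List.nil_append, List.reverse_reverse]
  exact pdbA_items f d.keys hnd

-- ===== VERDICT (by name: the statement is the Claim_ definition above) =====
theorem pdb_to_pose_offset_spec : Claim_equal_pdb_to_pose_offset := by
  intro rs _
  unfold Spec_pdb_to_pose_offset
  exact pdb_equal rs
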